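-- pv_equiv track=rewrite | github.com/albumentations-team/albumentations | albumentations/augmentations/dropout/grid_dropout.py | _generate_holes
-- ===== SOURCE A (Python) =====
-- def _generate_holes(
--
--     width: int,
--     height: int,
--     unit_width: int,
--     unit_height: int,
--     hole_width: int,
--     hole_height: int,
--     shift_x: int,
--     shift_y: int,
-- ) -> list[tuple[int, int, int, int]]:
--     """Generates the list of holes to be dropped out."""
--     holes = []
--     for i in range(width // unit_width + 1):
--         for j in range(height // unit_height + 1):
--             x1 = min(shift_x + unit_width * i, width)
--             y1 = min(shift_y + unit_height * j, height)
--             x2 = min(x1 + hole_width, width)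
--             y2 = min(y1 + hole_height, height)
--             holes.append((x1, y1, x2, y2))
--     return holes
-- ===== SOURCE B (Python) =====
-- def _generate_holes(
--     width: int,
--     height: int,
--     unit_width: int,
--     unit_height: int,
--     hole_width: int,
--     hole_height: int,
--     shift_x: int,
--     shift_y: int,
-- ) -> list[tuple[int, int, int, int]]:
--     xs = []
--     for i in range(width // unit_width + 1):
--         x1 = min(shift_x + unit_width * i, width)
--         xs.append((x1, min(x1 + hole_width, width)))
--     if not xs:
--         return []
--     ys = []
--     for j in range(height // unit_height + 1):
--         y1 = min(shift_y + unit_height * j, height)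
--         ys.append((y1, min(y1 + hole_height, height)))
--     return [(x1, y1, x2, y2) for (x1, x2) in xs for (y1, y2) in ys]
-- ===== Notes on version B (the rewrite author's own statement) =====
-- stated objective: alternative
-- what changed: B precomputes the x-coordinate pairs and y-coordinate pairs in two separate single loops and then combines the two tables with a product pass, instead of recomputing all four min() expressions inside A's nested i/j loop.
import Mathlib
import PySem

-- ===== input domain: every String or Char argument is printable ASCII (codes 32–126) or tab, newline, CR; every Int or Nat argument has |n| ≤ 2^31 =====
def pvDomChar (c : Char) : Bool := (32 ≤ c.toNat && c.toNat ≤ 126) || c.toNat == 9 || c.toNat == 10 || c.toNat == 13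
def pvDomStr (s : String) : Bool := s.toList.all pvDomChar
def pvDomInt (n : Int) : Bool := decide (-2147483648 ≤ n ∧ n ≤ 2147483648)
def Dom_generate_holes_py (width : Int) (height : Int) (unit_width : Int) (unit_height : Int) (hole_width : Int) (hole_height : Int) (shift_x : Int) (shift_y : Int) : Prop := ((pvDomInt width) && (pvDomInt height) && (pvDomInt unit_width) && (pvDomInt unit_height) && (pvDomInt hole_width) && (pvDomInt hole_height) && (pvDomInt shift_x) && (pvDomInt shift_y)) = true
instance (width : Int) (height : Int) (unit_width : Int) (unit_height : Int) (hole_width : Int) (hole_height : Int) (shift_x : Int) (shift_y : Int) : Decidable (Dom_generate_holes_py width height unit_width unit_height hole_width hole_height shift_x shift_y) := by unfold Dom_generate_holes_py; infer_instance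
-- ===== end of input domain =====

-- B builds the x-pair and y-pair tables in two single loops and combines them in a product pass,
-- instead of recomputing every coordinate inside A's nested loop (objective: alternative decomposition).


-- ===== PORT A =====
-- Literal port of A: nested i/j loops appending one hole per inner iteration.
def generate_holes_py (width : Int) (height : Int) (unit_width : Int) (unit_height : Int) (hole_width : Int) (hole_height : Int) (shift_x : Int) (shift_y : Int) : List (Int × Int × Int × Int) :=
  (PySem.List.pyRange 0 (PySem.Int.floordiv width unit_width + 1) 1).foldl
    (fun holes i =>
      (PySem.List.pyRange 0 (PySem.Int.floordiv height unit_height + 1) 1).foldl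
        (fun holes j =>
          let x1 := min (shift_x + unit_width * i) width
          let y1 := min (shift_y + unit_height * j) height
          let x2 := min (x1 + hole_width) width
          let y2 := min (y1 + hole_height) height
          holes ++ [(x1, y1, x2, y2)]) holes) []

-- ===== PORT B =====
-- B precomputes the x-pair and y-pair tables once, then combines them.
def generate_holes_py_alt (width : Int) (height : Int) (unit_width : Int) (unit_height : Int) (hole_width : Int) (hole_height : Int) (shift_x : Int) (shift_y : Int) : List (Int × Int × Int × Int) :=
  let xs := (PySem.List.pyRange 0 (PySem.Int.floordiv width unit_width + 1) 1).map
    (fun i =>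
      let x1 := min (shift_x + unit_width * i) width
      (x1, min (x1 + hole_width) width))
  if xs = [] then [] else
  let ys := (PySem.List.pyRange 0 (PySem.Int.floordiv height unit_height + 1) 1).map
    (fun j =>
      let y1 := min (shift_y + unit_height * j) height
      (y1, min (y1 + hole_height) height))
  xs.flatMap (fun p => ys.map (fun q => (p.1, q.1, p.2, q.2)))

-- ===== PRECONDITION & SPEC =====
-- Pre_ excludes unit_width = 0 or unit_height = 0, where Python's '//' raises ZeroDivisionError.
def Pre_generate_holes_py (width : Int) (height : Int) (unit_width : Int) (unit_height : Int) (hole_width : Int) (hole_height : Int) (shift_x : Int) (shift_y : Int) : Prop :=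
  unit_width ≠ 0 ∧ unit_height ≠ 0
instance (width : Int) (height : Int) (unit_width : Int) (unit_height : Int) (hole_width : Int) (hole_height : Int) (shift_x : Int) (shift_y : Int) : Decidable (Pre_generate_holes_py width height unit_width unit_height hole_width hole_height shift_x shift_y) := by unfold Pre_generate_holes_py; infer_instance
def pvWitness_generate_holes_py : Int × Int × Int × Int × Int × Int × Int × Int := (10, 8, 4, 4, 2, 2, 1, 1)

def Spec_generate_holes_py (width : Int) (height : Int) (unit_width : Int) (unit_height : Int) (hole_width : Int) (hole_height : Int) (shift_x : Int) (shift_y : Int) (out : List (Int × Int × Int × Int)) : Prop := out = generate_holes_py_alt width height unit_width unit_height hole_width hole_height shift_x shift_y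
instance (width : Int) (height : Int) (unit_width : Int) (unit_height : Int) (hole_width : Int) (hole_height : Int) (shift_x : Int) (shift_y : Int) (out : List (Int × Int × Int × Int)) : Decidable (Spec_generate_holes_py width height unit_width unit_height hole_width hole_height shift_x shift_y out) := by unfold Spec_generate_holes_py; infer_instance

-- ===== CLAIM (what is proved, stated in full; the proofs are below) =====
def Claim_equal_generate_holes_py : Prop := ∀ (width : Int) (height : Int) (unit_width : Int) (unit_height : Int) (hole_width : Int) (hole_height : Int) (shift_x : Int) (shift_y : Int), Dom_generate_holes_py width height unit_width unit_height hole_width hole_height shift_x shift_y → Pre_generate_holes_py width height unit_width unit_height hole_width hole_height shift_x shift_y → Spec_generate_holes_py width height unit_width unit_height hole_width hole_height shift_x shift_y (generate_holes_py width height unit_width unit_height hole_width hole_height shift_x shift_y)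

-- ===== LEMMAS AND PROOFS =====

-- ===== VERDICT (by name: the statement is the Claim_ definition above) =====
theorem generate_holes_py_spec : Claim_equal_generate_holes_py := by
  intro width height unit_width unit_height hole_width hole_height shift_x shift_y _ _
  unfold Spec_generate_holes_py generate_holes_py generate_holes_py_alt
  simp only [PySem.List.foldl_append_singleton_eq_map, PySem.List.foldl_append_eq_flatMap,
    List.flatMap_map, List.map_map, List.nil_append, Function.comp_def]
  split
  · next h =>
    rw [List.flatMap_eq_nil_iff.mpr]
    intro l hl
    rw [List.map_eq_nil_iff.mp h] at hl
    cases hl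
  · rfl
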